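-- pv_equiv track=rewrite | github.com/sylendravinayak/movie_backend-phase2 | app/chatbot/nodes/screen.py | _match_text_against_options
-- ===== SOURCE A (Python) =====
-- from typing import Optional, List, Dict
--
-- def _match_text_against_options(text: str, options: List[Dict], key: str) -> List[Dict]:
--     if not text or not options:
--         return []
--     norm = text.strip().lower()
--     exact = [o for o in options if (o.get(key) or "").strip().lower() == norm]
--     if exact:
--         return exact
--     return [o for o in options if norm in (o.get(key) or "").strip().lower()]
-- ===== SOURCE B (Python) =====
-- from typing import Optional, List, Dict
--
-- def _match_text_against_options(text: str, options: List[Dict], key: str) -> List[Dict]: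
--     # Rank-and-select-minimum: score every option once (0 = exact match,
--     # 1 = substring match, 2 = no match), then return the options that
--     # achieve the best (minimum) score, provided that score is a match.
--     if not text or not options:
--         return []
--     norm = text.strip().lower()
--
--     def rank(o):
--         s = (o.get(key) or "").strip().lower()
--         if s == norm:
--             return 0
--         if norm in s:
--             return 1
--         return 2
--
--     ranks = [rank(o) for o in options]
--     best = min(ranks)
--     if best == 2:
--         return []
--     return [o for r, o in zip(ranks, options) if r == best]
-- ===== Notes on version B (the rewrite author's own statement) =====
-- stated objective: alternative
-- what changed: Replaces A's staged exact-filter-then-substring-fallback by a rank-and-select-minimum algorithm: each option is scored once (0 exact, 1 substring, 2 none), the minimum score is computed, and the options achieving that score are returned when it denotes a match.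
import Mathlib
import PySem

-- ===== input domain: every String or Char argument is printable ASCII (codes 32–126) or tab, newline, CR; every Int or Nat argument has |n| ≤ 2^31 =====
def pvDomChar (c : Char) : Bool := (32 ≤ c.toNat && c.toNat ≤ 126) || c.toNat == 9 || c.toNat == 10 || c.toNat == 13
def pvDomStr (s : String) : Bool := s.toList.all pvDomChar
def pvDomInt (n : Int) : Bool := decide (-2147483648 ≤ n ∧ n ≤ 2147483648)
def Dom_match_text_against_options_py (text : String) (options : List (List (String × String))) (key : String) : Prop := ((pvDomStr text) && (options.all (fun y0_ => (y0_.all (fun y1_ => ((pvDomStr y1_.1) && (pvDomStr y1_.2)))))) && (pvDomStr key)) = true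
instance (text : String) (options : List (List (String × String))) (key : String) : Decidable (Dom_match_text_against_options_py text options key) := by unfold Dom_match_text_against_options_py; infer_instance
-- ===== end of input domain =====

-- B replaces A's staged exact-filter-then-substring-fallback by a rank-and-select-minimum
-- algorithm: score each option once (0 exact, 1 substring, 2 none), take the minimum score,
-- return the options achieving it when it denotes a match (alternative algorithm, same cost).


-- ===== PORT A =====
-- (o.get(key) or "").strip().lower() — dict lookup is first match in the association list;
-- 'or ""' turns a missing or empty value into "" (strip/lower of "" is "", so getD "" is exact)
def pvNormVal (o : List (String × String)) (key : String) : String :=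
  PySem.Str.lower (PySem.Str.strip (((o.find? (fun p => p.1 == key)).map Prod.snd).getD ""))

def match_text_against_options_py (text : String) (options : List (List (String × String))) (key : String) : List (List (String × String)) :=
  if text = "" || options = [] then []
  else
    let norm := PySem.Str.lower (PySem.Str.strip text)
    let exact := options.filter (fun o => pvNormVal o key == norm)
    if exact ≠ [] then exact
    else options.filter (fun o => PySem.Str.isIn norm (pvNormVal o key))

-- ===== PORT B =====
-- rank(o): 0 = exact match, 1 = substring match, 2 = no match
def pvRank (norm : String) (key : String) (o : List (String × String)) : Nat :=
  let s := pvNormVal o key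
  if s == norm then 0 else if PySem.Str.isIn norm s then 1 else 2

def match_text_against_options_py_alt (text : String) (options : List (List (String × String))) (key : String) : List (List (String × String)) :=
  if text = "" || options = [] then []
  else
    let norm := PySem.Str.lower (PySem.Str.strip text)
    let ranks := options.map (pvRank norm key)
    -- min(ranks): Python's min on a nonempty list; none is unreachable under the guard
    match PySem.List.min? ranks (fun x => x) with
    | none => []
    | some best =>
      if best == 2 then []
      else ((ranks.zip options).filter (fun p => p.1 == best)).map Prod.snd

-- ===== PRECONDITION & SPEC =====
def Spec_match_text_against_options_py (text : String) (options : List (List (String × String))) (key : String) (out : List (List (String × String))) : Prop := out = match_text_against_options_py_alt text options key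
instance (text : String) (options : List (List (String × String))) (key : String) (out : List (List (String × String))) : Decidable (Spec_match_text_against_options_py text options key out) := by unfold Spec_match_text_against_options_py; infer_instance

-- ===== CLAIM (what is proved, stated in full; the proofs are below) =====
def Claim_equal_match_text_against_options_py : Prop := ∀ (text : String) (options : List (List (String × String))) (key : String), Dom_match_text_against_options_py text options key → Spec_match_text_against_options_py text options key (match_text_against_options_py text options key)

-- ===== LEMMAS AND PROOFS =====
-- selecting by rank through zip(ranks, options) is a filter over options
lemma pvZipFilter {α : Type} (f : α → Nat) (b : Nat) (l : List α) :
    (((l.map f).zip l).filter (fun p => p.1 == b)).map Prod.snd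
      = l.filter (fun o => f o == b) := by
  induction l with
  | nil => rfl
  | cons x xs ih =>
    simp only [List.map_cons, List.zip_cons_cons, List.filter_cons]
    cases h : (f x == b) <;> simp [ih]

-- min(ranks) on a nonempty list returns a value
lemma pvMin?_isSome {l : List Nat} (h : l ≠ []) :
    ∃ b, PySem.List.min? l (fun x => x) = some b := by
  cases l with
  | nil => exact absurd rfl h
  | cons x t => exact ⟨_, PySem.List.min?_id_cons x t⟩

-- characterisation of the minimum rank when some rank equals k and none is below k
lemma pvMinEq {ranks : List Nat} {k best : Nat}
    (hmem : k ∈ ranks) (hlb : ∀ r ∈ ranks, k ≤ r)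
    (h : PySem.List.min? ranks (fun x => x) = some best) : best = k := by
  have h1 := PySem.List.min?_mem h
  have h2 := PySem.List.min?_isMin h k hmem
  exact le_antisymm h2 (hlb best h1)

-- ===== VERDICT (by name: the statement is the Claim_ definition above) =====
theorem match_text_against_options_py_spec : Claim_equal_match_text_against_options_py := by
  intro text options key _
  unfold Spec_match_text_against_options_py match_text_against_options_py match_text_against_options_py_alt
  by_cases hguard : text = "" || options = []
  · simp [hguard]
  · simp only [hguard, Bool.false_eq_true, if_false, PySem.Str.isIn_eq]
    set norm := PySem.Str.lower (PySem.Str.strip text) with hnorm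
    have hopts : options ≠ [] := fun h => hguard (by simp [h])
    obtain ⟨best, hbest⟩ := pvMin?_isSome (l := options.map (pvRank norm key)) (by simp [hopts])
    simp only [hbest]
    by_cases hex : options.filter (fun o => pvNormVal o key == norm) ≠ []
    · -- exact matches exist: best = 0, B selects the rank-0 options = the exact list
      obtain ⟨o, ho'⟩ := List.exists_mem_of_ne_nil _ hex
      have ho := List.mem_filter.mp ho'
      have h0 : (0 : Nat) ∈ options.map (pvRank norm key) :=
        List.mem_map.mpr ⟨o, ho.1, by simp [pvRank, ho.2]⟩
      have hbest0 : best = 0 := pvMinEq h0 (fun r _ => Nat.zero_le r) hbest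
      subst hbest0
      rw [if_pos hex, if_neg (by decide), pvZipFilter]
      symm
      refine List.filter_congr ?_
      intro x _
      by_cases hP : (pvNormVal x key == norm) = true
      · simp [pvRank, hP]
      · simp only [pvRank, hP, Bool.false_eq_true, if_false]
        split <;> simp
    · -- no exact match: every option has rank ≥ 1
      have hex' : options.filter (fun o => pvNormVal o key == norm) = [] := not_not.mp hex
      have hnoP : ∀ o ∈ options, ¬ (pvNormVal o key == norm) = true := by
        simpa using List.filter_eq_nil_iff.mp hex'
      have hrank : ∀ o ∈ options, pvRank norm key o
          = if PySem.Chars.isIn norm.toList (pvNormVal o key).toList then 1 else 2 := by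
        intro o ho; simp [pvRank, PySem.Str.isIn_eq, hnoP o ho]
      rw [if_neg (not_not.mp (by simpa [PySem.Str.isIn_eq] using hex))]
      by_cases hsub :
          options.filter (fun o => PySem.Chars.isIn norm.toList (pvNormVal o key).toList) ≠ []
      · -- substring matches exist: best = 1, B selects the rank-1 options = the substring list
        obtain ⟨o, ho'⟩ := List.exists_mem_of_ne_nil _ hsub
        have ho := List.mem_filter.mp ho'
        have h1 : (1 : Nat) ∈ options.map (pvRank norm key) :=
          List.mem_map.mpr ⟨o, ho.1, by rw [hrank o ho.1, if_pos ho.2]⟩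
        have hlb : ∀ r ∈ options.map (pvRank norm key), 1 ≤ r := by
          intro r hr
          obtain ⟨x, hx, hfx⟩ := List.mem_map.mp hr
          rw [hrank x hx] at hfx
          split at hfx <;> omega
        have hbest1 : best = 1 := pvMinEq h1 hlb hbest
        subst hbest1
        rw [if_neg (by decide), pvZipFilter]
        symm
        refine List.filter_congr ?_
        intro x hx
        rw [hrank x hx]
        cases hQ : PySem.Chars.isIn norm.toList (pvNormVal x key).toList <;> simp
      · -- no match at all: best = 2, both programs return []
        have hsub' :
            options.filter (fun o => PySem.Chars.isIn norm.toList (pvNormVal o key).toList) = [] :=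
          not_not.mp hsub
        have hnoQ : ∀ o ∈ options,
            PySem.Chars.isIn norm.toList (pvNormVal o key).toList = false := by
          intro o ho
          simpa using List.filter_eq_nil_iff.mp hsub' o ho
        obtain ⟨o, ho⟩ := List.exists_mem_of_ne_nil _ hopts
        have h2 : (2 : Nat) ∈ options.map (pvRank norm key) :=
          List.mem_map.mpr ⟨o, ho, by rw [hrank o ho, if_neg (by simp [hnoQ o ho])]⟩
        have hlb : ∀ r ∈ options.map (pvRank norm key), 2 ≤ r := by
          intro r hr
          obtain ⟨x, hx, hfx⟩ := List.mem_map.mp hr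
          rw [hrank x hx, if_neg (by simp [hnoQ x hx])] at hfx
          omega
        have hbest2 : best = 2 := pvMinEq h2 hlb hbest
        subst hbest2
        rw [hsub', if_pos (by decide)]
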